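-- pv_equiv track=rewrite | github.com/Tavo121/Proyecto-2 | Pruebas2.py | dividir_lista
-- ===== SOURCE A (Python) =====
-- def dividir_lista(Nombres, i, Cant_list, Pivote, Menores, Iguales, Mayores):
--     if i == Cant_list:
--         return Menores, Iguales, Mayores
--     if num_finder(Nombres[i], 0, '') < Pivote:
--         Menores.append(Nombres[i])
--     elif num_finder(Nombres[i], 0, '') > Pivote:
--         Mayores.append(Nombres[i])
--     elif num_finder(Nombres[i], 0, '') == Pivote:
--         Iguales.append(Nombres[i])
--     return dividir_lista(Nombres,i+1,Cant_list,Pivote,Menores,Iguales,Mayores)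
--
-- def num_finder(Nombre, i, Result): #toma los numeros del string ingresado
--     if Nombre[i] == "1" or Nombre[i] == '2' or Nombre[i] == '3' or Nombre[i] == "4" or Nombre[i] == '5' or Nombre[i] == '6' or Nombre[i] == '7' or Nombre[i] == '8' or Nombre[i] == '9':
--         Result = Nombre[i:-2]
--         return Result
--     else:
--         return num_finder(Nombre, i+1, Result)
-- ===== SOURCE B (Python) =====
-- def dividir_lista(Nombres, i, Cant_list, Pivote, Menores, Iguales, Mayores):
--     # staged passes: key each string of the window once, then extend each bucket
--     # with one comprehension (mutates the same passed-in lists via +=)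
--     keyed = [(first_num(s), s) for s in Nombres[i:Cant_list]]
--     Menores += [s for n, s in keyed if n < Pivote]
--     Iguales += [s for n, s in keyed if n == Pivote]
--     Mayores += [s for n, s in keyed if n > Pivote]
--     return Menores, Iguales, Mayores
--
-- def first_num(s):
--     for j, c in enumerate(s):
--         if c in '123456789':
--             return s[j:-2]
-- ===== Notes on version B (the rewrite author's own statement) =====
-- stated objective: alternative
-- what changed: Replaced A's element-by-element double recursion (recursive index walk calling a recursive per-character num_finder up to three times per element) by a slice-and-staged-passes version: key every string of the window Nombres[i:Cant_list] once, then build the three buckets with three comprehensions extending the passed-in lists.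
import Mathlib
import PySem

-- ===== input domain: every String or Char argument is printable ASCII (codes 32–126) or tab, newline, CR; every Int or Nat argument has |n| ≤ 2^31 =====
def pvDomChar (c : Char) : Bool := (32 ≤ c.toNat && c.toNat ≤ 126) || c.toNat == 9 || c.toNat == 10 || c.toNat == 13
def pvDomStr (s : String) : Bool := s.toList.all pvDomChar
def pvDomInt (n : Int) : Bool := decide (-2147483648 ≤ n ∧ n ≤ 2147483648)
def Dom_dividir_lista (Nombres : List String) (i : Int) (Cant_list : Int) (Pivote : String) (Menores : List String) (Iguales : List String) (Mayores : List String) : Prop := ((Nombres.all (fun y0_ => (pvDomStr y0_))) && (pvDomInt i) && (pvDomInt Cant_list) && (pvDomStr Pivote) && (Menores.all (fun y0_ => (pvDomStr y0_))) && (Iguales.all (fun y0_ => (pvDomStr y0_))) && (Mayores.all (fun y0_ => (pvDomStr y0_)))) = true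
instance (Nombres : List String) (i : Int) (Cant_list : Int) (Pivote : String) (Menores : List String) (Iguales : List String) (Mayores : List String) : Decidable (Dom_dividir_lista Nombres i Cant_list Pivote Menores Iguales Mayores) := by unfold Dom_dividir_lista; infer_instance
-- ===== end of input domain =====

-- B replaces A's double recursion (recursive index walk + recursive char-by-char num_finder) by
-- slice-and-staged-passes: key every string of the window Nombres[i:Cant_list] once, then build the
-- three buckets with three comprehensions (objective: alternative).  In Python both A and B extend the
-- SAME passed-in Menores/Iguales/Mayores lists (final contents identical); the equivalence proved
-- here is about the returned triple.

-- helper cited by port A's decreasing_by: a successful Python index read implies i < len(xs)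
theorem pyGet?_some_lt_len {α : Type} {xs : List α} {i : Int} {a : α}
    (h : PySem.List.pyGet? xs i = some a) : i < (xs.length : Int) := by
  by_contra hc
  push Not at hc
  rw [(PySem.List.pyGet?_eq_none_iff xs i).mpr (by rintro ⟨-, h2⟩; omega)] at h
  simp at h

-- ===== PORT A =====
-- num_finder(Nombre, i, Result): scans Nombre from index i for a digit '1'..'9' and returns
-- Nombre[i:-2] from there; none = the IndexError Python raises when the scan runs off the string.
def numFinder (Nombre : List Char) (i : Int) (Result : List Char) : Option (List Char) :=
  match h : PySem.List.pyGet? Nombre i with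
  | some c =>
    if c = '1' ∨ c = '2' ∨ c = '3' ∨ c = '4' ∨ c = '5' ∨ c = '6' ∨ c = '7' ∨ c = '8' ∨ c = '9' then
      some (PySem.List.slice Nombre (some i) (some (-2)))
    else numFinder Nombre (i + 1) Result
  | none => none
termination_by ((Nombre.length : Int) - i).toNat
decreasing_by
  have := pyGet?_some_lt_len h
  omega

def dividir_lista (Nombres : List String) (i : Int) (Cant_list : Int) (Pivote : String) (Menores : List String) (Iguales : List String) (Mayores : List String) : List String × List String × List String :=
  if i = Cant_list then (Menores, Iguales, Mayores)
  else
    match h : PySem.List.pyGet? Nombres i with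
    | none => (Menores, Iguales, Mayores)      -- Nombres[i] raises IndexError in Python
    | some s =>
      match numFinder s.toList 0 [] with
      | none => (Menores, Iguales, Mayores)    -- num_finder raises IndexError in Python
      | some n =>
        if n < Pivote.toList then
          dividir_lista Nombres (i + 1) Cant_list Pivote (Menores ++ [s]) Iguales Mayores
        else if Pivote.toList < n then
          dividir_lista Nombres (i + 1) Cant_list Pivote Menores Iguales (Mayores ++ [s])
        else if n = Pivote.toList then
          dividir_lista Nombres (i + 1) Cant_list Pivote Menores (Iguales ++ [s]) Mayores
        else
          dividir_lista Nombres (i + 1) Cant_list Pivote Menores Iguales Mayores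
termination_by ((Nombres.length : Int) - i).toNat
decreasing_by all_goals (have := pyGet?_some_lt_len h; omega)

-- ===== PORT B =====
-- first_num(s): first digit '1'..'9' found by the for/enumerate loop, then s[j:-2];
-- none = the loop falls through and Python returns None.
def firstNum (s : List Char) : Option (List Char) :=
  match s.findIdx? (fun c => decide (c ∈ "123456789".toList)) with
  | some j => some (PySem.List.slice s (some (j : Int)) (some (-2)))
  | none => none

-- 'n < Pivote' / 'n > Pivote' raise TypeError in Python when n is None (no digit found): those
-- inputs are excluded by Pre_; 'n == Pivote' is Python-False for None.
def keyLt (k : Option (List Char)) (P : List Char) : Bool :=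
  match k with | some n => decide (n < P) | none => false
def keyGt (k : Option (List Char)) (P : List Char) : Bool :=
  match k with | some n => decide (P < n) | none => false
def keyEq (k : Option (List Char)) (P : List Char) : Bool :=
  match k with | some n => decide (n = P) | none => false

-- one comprehension '[s for n, s in keyed if pred]' over the keyed window
def keep (f : Option (List Char) → List Char → Bool) (seg : List String) (P : List Char) : List String :=
  ((seg.map (fun s => (firstNum s.toList, s))).filter (fun p => f p.1 P)).map Prod.snd

def dividir_lista_alt (Nombres : List String) (i : Int) (Cant_list : Int) (Pivote : String) (Menores : List String) (Iguales : List String) (Mayores : List String) : List String × List String × List String :=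
  let seg := PySem.List.slice Nombres (some i) (some Cant_list)
  (Menores ++ keep keyLt seg Pivote.toList,
   Iguales ++ keep keyEq seg Pivote.toList,
   Mayores ++ keep keyGt seg Pivote.toList)

-- ===== PRECONDITION & SPEC =====
-- Pre_: the natural domain of this partition helper — either nothing to do (i = Cant_list), or a
-- window 0 ≤ i ≤ Cant_list ≤ len(Nombres) whose strings each contain a digit '1'..'9' (otherwise
-- A's num_finder raises IndexError).  Pre_ excludes negative start indices i < Cant_list, on which
-- A still returns but revisits elements through Python's negative-index wraparound — outside the
-- function's natural domain (see claim cites).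
def Pre_dividir_lista (Nombres : List String) (i : Int) (Cant_list : Int) (Pivote : String) (Menores : List String) (Iguales : List String) (Mayores : List String) : Prop :=
  i = Cant_list ∨
  (0 ≤ i ∧ i ≤ Cant_list ∧ Cant_list ≤ (Nombres.length : Int) ∧
   ∀ s ∈ (Nombres.drop i.toNat).take (Cant_list.toNat - i.toNat),
     s.toList.any (fun c => decide (c ∈ "123456789".toList)) = true)
instance (Nombres : List String) (i : Int) (Cant_list : Int) (Pivote : String) (Menores : List String) (Iguales : List String) (Mayores : List String) : Decidable (Pre_dividir_lista Nombres i Cant_list Pivote Menores Iguales Mayores) := by unfold Pre_dividir_lista; infer_instance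

def pvWitness_dividir_lista : List String × Int × Int × String × List String × List String × List String :=
  (["a1bc", "z9"], 0, 2, "a", [], ["q"], [])

def Spec_dividir_lista (Nombres : List String) (i : Int) (Cant_list : Int) (Pivote : String) (Menores : List String) (Iguales : List String) (Mayores : List String) (out : List String × List String × List String) : Prop := out = dividir_lista_alt Nombres i Cant_list Pivote Menores Iguales Mayores
instance (Nombres : List String) (i : Int) (Cant_list : Int) (Pivote : String) (Menores : List String) (Iguales : List String) (Mayores : List String) (out : List String × List String × List String) : Decidable (Spec_dividir_lista Nombres i Cant_list Pivote Menores Iguales Mayores out) := by unfold Spec_dividir_lista; infer_instance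

-- ===== CLAIM (what is proved, stated in full; the proofs are below) =====
def Claim_equal_dividir_lista : Prop := ∀ (Nombres : List String) (i : Int) (Cant_list : Int) (Pivote : String) (Menores : List String) (Iguales : List String) (Mayores : List String), Dom_dividir_lista Nombres i Cant_list Pivote Menores Iguales Mayores → Pre_dividir_lista Nombres i Cant_list Pivote Menores Iguales Mayores → Spec_dividir_lista Nombres i Cant_list Pivote Menores Iguales Mayores (dividir_lista Nombres i Cant_list Pivote Menores Iguales Mayores)

-- ===== LEMMAS AND PROOFS =====

-- A's or-chain over '1'..'9' is B's membership test in '123456789'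
theorem digit_chain_iff (c : Char) :
    (c = '1' ∨ c = '2' ∨ c = '3' ∨ c = '4' ∨ c = '5' ∨ c = '6' ∨ c = '7' ∨ c = '8' ∨ c = '9')
      ↔ (decide (c ∈ "123456789".toList) = true) := by
  have h : "123456789".toList = ['1', '2', '3', '4', '5', '6', '7', '8', '9'] := rfl
  simp [h]

-- numFinder from index i is findIdx? on the dropped suffix, with the index shifted back by i
theorem numFinder_eq_find (l : List Char) : ∀ (n i : Nat), l.length - i ≤ n → ∀ (r : List Char),
    numFinder l (i : Int) r =
      match (l.drop i).findIdx? (fun c => decide (c ∈ "123456789".toList)) with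
      | some k => some (PySem.List.slice l (some ((i + k : Nat) : Int)) (some (-2)))
      | none => none := by
  intro n
  induction n with
  | zero =>
    intro i hn r
    have hge : l.length ≤ i := by omega
    have hnone : PySem.List.pyGet? l (i : Int) = none := by
      simp [List.getElem?_eq_none hge]
    rw [numFinder, List.drop_eq_nil_of_le hge]
    simp only [List.findIdx?_nil]
    split
    · next c heq => rw [hnone] at heq; simp at heq
    · rfl
  | succ n ih =>
    intro i hn r
    by_cases hge : l.length ≤ i
    · have hnone : PySem.List.pyGet? l (i : Int) = none := by
        simp [List.getElem?_eq_none hge]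
      rw [numFinder, List.drop_eq_nil_of_le hge]
      simp only [List.findIdx?_nil]
      split
      · next c heq => rw [hnone] at heq; simp at heq
      · rfl
    · push Not at hge
      have hsome : PySem.List.pyGet? l (i : Int) = some l[i] := by
        simp [List.getElem?_eq_getElem hge]
      rw [numFinder, List.drop_eq_getElem_cons hge, List.findIdx?_cons]
      split
      · next c heq =>
        rw [hsome] at heq
        injection heq with hc
        subst hc
        by_cases hd : decide (l[i] ∈ "123456789".toList) = true
        · rw [if_pos ((digit_chain_iff l[i]).mpr hd), if_pos hd]
          simp
        · rw [if_neg (fun hch => hd ((digit_chain_iff l[i]).mp hch)), if_neg hd]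
          have hcast : ((i : Int) + 1) = ((i + 1 : Nat) : Int) := by push_cast; ring
          rw [hcast, ih (i + 1) (by omega) r]
          cases hf : (l.drop (i + 1)).findIdx? (fun c => decide (c ∈ "123456789".toList)) with
          | none => simp
          | some k =>
            simp only [Option.map_some]
            have h' : i + (k + 1) = i + 1 + k := by omega
            rw [h']
      · next heq => rw [hsome] at heq; simp at heq

theorem numFinder_eq_firstNum (s : List Char) : numFinder s 0 [] = firstNum s := by
  have h := numFinder_eq_find s s.length 0 (by omega) []
  simp only [Nat.cast_zero, List.drop_zero] at h
  rw [h, firstNum]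
  cases hf : s.findIdx? (fun c => decide (c ∈ "123456789".toList)) with
  | none => rfl
  | some j => simp

-- a string with a digit has a some key
theorem firstNum_isSome {s : List Char}
    (h : s.any (fun c => decide (c ∈ "123456789".toList)) = true) :
    ∃ nv, firstNum s = some nv := by
  unfold firstNum
  cases hf : s.findIdx? (fun c => decide (c ∈ "123456789".toList)) with
  | none =>
    rw [List.findIdx?_eq_none_iff] at hf
    rw [List.any_eq_true] at h
    obtain ⟨c, hc, hp⟩ := h
    rw [hf c hc] at hp
    exact absurd hp (by simp)
  | some j => exact ⟨_, rfl⟩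

theorem keep_cons (f : Option (List Char) → List Char → Bool) (s : String) (seg : List String) (P : List Char) :
    keep f (s :: seg) P =
      if f (firstNum s.toList) P then s :: keep f seg P else keep f seg P := by
  simp only [keep, List.map_cons, List.filter_cons]
  split_ifs <;> simp_all

-- A's recursion over the window [j, j+n) produces B's three staged buckets
theorem A_eq_buckets : ∀ (n j : Nat) (N : List String) (P : String) (M I G : List String),
    j + n ≤ N.length →
    (∀ s ∈ (N.drop j).take n, s.toList.any (fun c => decide (c ∈ "123456789".toList)) = true) →
    dividir_lista N (j : Int) ((j + n : Nat) : Int) P M I G =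
      (M ++ keep keyLt ((N.drop j).take n) P.toList,
       I ++ keep keyEq ((N.drop j).take n) P.toList,
       G ++ keep keyGt ((N.drop j).take n) P.toList) := by
  intro n
  induction n with
  | zero =>
    intro j N P M I G _ _
    rw [dividir_lista]
    simp [keep]
  | succ n ih =>
    intro j N P M I G hlen hdig
    have hj : j < N.length := by omega
    have hne : (j : Int) ≠ ((j + (n + 1) : Nat) : Int) := by push_cast; omega
    have hsome : PySem.List.pyGet? N (j : Int) = some N[j] := by
      simp [List.getElem?_eq_getElem hj]
    have hseg : (N.drop j).take (n + 1) = N[j] :: (N.drop (j + 1)).take n := by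
      rw [List.drop_eq_getElem_cons hj, List.take_succ_cons]
    rw [hseg] at hdig
    obtain ⟨nv, hnv⟩ := firstNum_isSome (hdig N[j] (by simp))
    have hdig' : ∀ s ∈ (N.drop (j + 1)).take n,
        s.toList.any (fun c => decide (c ∈ "123456789".toList)) = true := by
      intro s hs; exact hdig s (by simp [hs])
    have hcast : ((j : Int) + 1) = ((j + 1 : Nat) : Int) := by push_cast; ring
    have hcast2 : ((j + (n + 1) : Nat) : Int) = (((j + 1) + n : Nat) : Int) := by push_cast; ring
    rw [dividir_lista, if_neg hne, hsome]
    simp only [numFinder_eq_firstNum, hnv]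
    rw [hseg, keep_cons, keep_cons, keep_cons]
    simp only [hnv, keyLt, keyEq, keyGt]
    rcases lt_trichotomy nv P.toList with hlt | heqv | hgt
    · have hA2 : ¬ (P.toList < nv) := not_lt_of_gt hlt
      have hne2 : ¬ (nv = P.toList) := ne_of_lt hlt
      have hBl : (decide (nv < P.toList)) = true := by simp [hlt]
      have hBe : ¬ (decide (nv = P.toList) = true) := by simp [hne2]
      have hBg : ¬ (decide (P.toList < nv) = true) := by simp [hA2]
      rw [if_pos hlt, if_pos hBl, if_neg hBe, if_neg hBg]
      rw [hcast, hcast2, ih (j + 1) N P (M ++ [N[j]]) I G (by omega) hdig']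
      simp
    · subst heqv
      have hA1 : ¬ (P.toList < P.toList) := lt_irrefl _
      have hB1 : ¬ (decide (P.toList < P.toList) = true) := by simp
      have hB2 : (decide (P.toList = P.toList)) = true := by simp
      rw [if_neg hA1, if_neg hA1, if_pos rfl, if_neg hB1, if_pos hB2, if_neg hB1]
      rw [hcast, hcast2, ih (j + 1) N P M (I ++ [N[j]]) G (by omega) hdig']
      simp
    · have hA1 : ¬ (nv < P.toList) := not_lt_of_gt hgt
      have hne2 : ¬ (nv = P.toList) := ne_of_gt hgt
      have hB1 : ¬ (decide (nv < P.toList) = true) := by simp [hA1]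
      have hBe : ¬ (decide (nv = P.toList) = true) := by simp [hne2]
      have hBg : (decide (P.toList < nv)) = true := by simp [hgt]
      rw [if_neg hA1, if_pos hgt, if_neg hB1, if_neg hBe, if_pos hBg]
      rw [hcast, hcast2, ih (j + 1) N P M I (G ++ [N[j]]) (by omega) hdig']
      simp

-- B's slice over an empty window is empty
theorem slice_self_nil {α : Type} (xs : List α) (a : Int) :
    PySem.List.slice xs (some a) (some a) = [] := by
  have h := PySem.List.length_slice xs a a
  cases hs : PySem.List.slice xs (some a) (some a) with
  | nil => rfl
  | cons x t => rw [hs] at h; simp at h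

-- ===== VERDICT (by name: the statement is the Claim_ definition above) =====
theorem dividir_lista_spec : Claim_equal_dividir_lista := by
  intro N i C P M I G _ hpre
  unfold Spec_dividir_lista dividir_lista_alt
  rcases hpre with heq | ⟨h0, hic, hcl, hdig⟩
  · subst heq
    rw [dividir_lista]
    simp [slice_self_nil, keep]
  · have hi : i = ((i.toNat : Nat) : Int) := by omega
    have hn : C = ((i.toNat + (C.toNat - i.toNat) : Nat) : Int) := by omega
    rw [PySem.List.slice_toNat N h0 (by omega)]
    rw [hi, hn]
    rw [A_eq_buckets (C.toNat - i.toNat) i.toNat N P M I G (by omega) (by exact hdig)]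
    have e1 : (max i 0).toNat = i.toNat := by omega
    have e2 : ((max i 0) + ((C.toNat - i.toNat : Nat) : Int)).toNat - i.toNat = C.toNat - i.toNat := by omega
    simp [e1, e2]
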